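-- pv_equiv track=rewrite | github.com/IliasN/aoc2020 | Day17/part1.py | round1
-- ===== SOURCE A (Python) =====
-- def round1(space: list, h: int, w: int, d: int) -> list:
--     return_space = [[["." for z in range(d)] for x in range(w)] for y in range(h)]
--     for j in range(h):
--         for i in range(w):
--             for k in range(d):
--                 count = count_neighbors(space, j, i, k, h, w, d)
--                 if space[j][i][k] == "#" and not (count == 2 or count == 3):
--                     return_space[j][i][k] = "."
--                 elif space[j][i][k] == "." and count == 3:
--                     return_space[j][i][k] = "#"
--                 else:
--                     return_space[j][i][k] = space[j][i][k]
--     return return_space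
--
-- def count_neighbors(space: list, j: int, i: int, k: int, h: int, w: int, d: int) -> int:
--     count = 0
--     for ja in (-1, 0, 1):
--         for ia in (-1, 0, 1):
--             for da in (-1, 0, 1):
--                 if 0 <= (j + ja) < h and 0 <= (i + ia) < w and 0 <= (k + da) < d:
--                     if ia == 0 and ja == 0 and da == 0:
--                         continue
--                     if space[j + ja][i + ia][k + da] == "#":
--                         count += 1
--     return count
-- ===== SOURCE B (Python) =====
-- OFFSETS = [(dj, di, dk)
--            for dj in (-1, 0, 1) for di in (-1, 0, 1) for dk in (-1, 0, 1)
--            if (dj, di, dk) != (0, 0, 0)]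
--
--
-- def round1(space: list, h: int, w: int, d: int) -> list:
--     # Scatter pass: every active cube adds 1 to each in-bounds neighbour's count.
--     counts = {}
--     for j in range(h):
--         for i in range(w):
--             for k in range(d):
--                 if space[j][i][k] == "#":
--                     for dj, di, dk in OFFSETS:
--                         p = (j + dj, i + di, k + dk)
--                         if 0 <= p[0] < h and 0 <= p[1] < w and 0 <= p[2] < d:
--                             counts[p] = counts.get(p, 0) + 1
--     # Apply pass: read the finished count table.
--     def cell(j, i, k):
--         c = space[j][i][k]
--         n = counts.get((j, i, k), 0)
--         if c == "#":
--             return "#" if n == 2 or n == 3 else "."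
--         if c == ".":
--             return "#" if n == 3 else "."
--         return c
--     return [[[cell(j, i, k) for k in range(d)] for i in range(w)]
--             for j in range(h)]
-- ===== Notes on version B (the rewrite author's own statement) =====
-- stated objective: alternative
-- what changed: Replaces A's per-cell gather (each cell scans its 26 neighbours via count_neighbors) with a scatter-then-apply decomposition: one pass over active cubes increments a dict of neighbour counts, then a second pass applies the life rule from that finished count table.
import Mathlib
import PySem

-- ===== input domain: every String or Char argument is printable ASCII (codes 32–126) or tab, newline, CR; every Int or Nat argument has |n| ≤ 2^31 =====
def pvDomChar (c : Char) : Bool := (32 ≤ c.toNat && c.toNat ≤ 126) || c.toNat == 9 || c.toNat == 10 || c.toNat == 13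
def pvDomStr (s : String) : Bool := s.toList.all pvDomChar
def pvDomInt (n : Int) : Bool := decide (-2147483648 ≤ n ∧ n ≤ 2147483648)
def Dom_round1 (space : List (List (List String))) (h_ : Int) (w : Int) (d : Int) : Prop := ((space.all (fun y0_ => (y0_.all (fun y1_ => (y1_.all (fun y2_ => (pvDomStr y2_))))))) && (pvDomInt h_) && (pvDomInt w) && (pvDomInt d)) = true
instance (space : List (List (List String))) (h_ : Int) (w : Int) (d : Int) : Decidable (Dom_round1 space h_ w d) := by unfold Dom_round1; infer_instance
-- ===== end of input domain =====

-- B replaces A's per-cell 26-neighbour gather by a scatter-then-apply pass: active cubes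
-- increment a dict of neighbour counts, then the rule is applied from that table (alternative
-- algorithm, same asymptotic cost).


-- ===== PORT A =====
-- the Python expression space[j][i][k]; exact on in-bounds indices (Pre_ excludes raising ones); shared by both ports
def cellAt (space : List (List (List String))) (j i k : Int) : String :=
  PySem.List.pyGetD (PySem.List.pyGetD (PySem.List.pyGetD space j []) i []) k ""

-- count_neighbors, transliterated: nested loops over (-1,0,1) with bounds check, self skip, '#' test
def countNeighbors (space : List (List (List String))) (j i k h_ w d : Int) : Int :=
  ([-1, 0, 1] : List Int).foldl (fun count ja =>
    ([-1, 0, 1] : List Int).foldl (fun count ia =>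
      ([-1, 0, 1] : List Int).foldl (fun count da =>
        if 0 ≤ j + ja ∧ j + ja < h_ ∧ 0 ≤ i + ia ∧ i + ia < w ∧ 0 ≤ k + da ∧ k + da < d then
          if ia = 0 ∧ ja = 0 ∧ da = 0 then count
          else if cellAt space (j + ja) (i + ia) (k + da) == "#" then count + 1 else count
        else count) count) count) 0

-- the loop body's branch chain (count computed first, as in the Python)
def newCellA (space : List (List (List String))) (h_ w d j i k : Int) : String :=
  let count := countNeighbors space j i k h_ w d
  if (cellAt space j i k == "#") && !(count == 2 || count == 3) then "."
  else if (cellAt space j i k == ".") && (count == 3) then "#"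
  else cellAt space j i k

-- the assignment return_space[j][i][k] = v (in-bounds under Pre_; exact there)
def set3 (rs : List (List (List String))) (j i k : Int) (v : String) : List (List (List String)) :=
  PySem.List.pySetD rs j (PySem.List.pySetD (PySem.List.pyGetD rs j []) i
    (PySem.List.pySetD (PySem.List.pyGetD (PySem.List.pyGetD rs j []) i []) k v))

def round1 (space : List (List (List String))) (h_ : Int) (w : Int) (d : Int) : List (List (List String)) :=
  let return_space := (PySem.List.pyRange 0 h_ 1).map (fun _y =>
    (PySem.List.pyRange 0 w 1).map (fun _x => (PySem.List.pyRange 0 d 1).map (fun _z => ".")))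
  (PySem.List.pyRange 0 h_ 1).foldl (fun rs j =>
    (PySem.List.pyRange 0 w 1).foldl (fun rs i =>
      (PySem.List.pyRange 0 d 1).foldl (fun rs k =>
        set3 rs j i k (newCellA space h_ w d j i k)) rs) rs) return_space

-- ===== PORT B =====
-- OFFSETS: the flat 26-element comprehension
def offsets26 : List (Int × Int × Int) :=
  ([-1, 0, 1] : List Int).flatMap (fun dj =>
    ([-1, 0, 1] : List Int).flatMap (fun di =>
      ([-1, 0, 1] : List Int).flatMap (fun dk =>
        if (dj, di, dk) ≠ ((0 : Int), (0 : Int), (0 : Int)) then [(dj, di, dk)] else [])))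

-- scatter pass: counts[p] = counts.get(p, 0) + 1 for each in-bounds neighbour p of an active cube
def scatter (space : List (List (List String))) (h_ w d : Int) : PySem.Dict (Int × Int × Int) Int :=
  (PySem.List.pyRange 0 h_ 1).foldl (fun cnts j =>
    (PySem.List.pyRange 0 w 1).foldl (fun cnts i =>
      (PySem.List.pyRange 0 d 1).foldl (fun cnts k =>
        if cellAt space j i k == "#" then
          offsets26.foldl (fun cnts o =>
            if 0 ≤ j + o.1 ∧ j + o.1 < h_ ∧ 0 ≤ i + o.2.1 ∧ i + o.2.1 < w ∧
               0 ≤ k + o.2.2 ∧ k + o.2.2 < d then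
              cnts.insert (j + o.1, i + o.2.1, k + o.2.2)
                (cnts.getD (j + o.1, i + o.2.1, k + o.2.2) 0 + 1)
            else cnts) cnts
        else cnts) cnts) cnts) PySem.Dict.empty

-- apply pass: Source B's cell(j, i, k), reading the finished count table
def applyCell (space : List (List (List String))) (counts : PySem.Dict (Int × Int × Int) Int)
    (j i k : Int) : String :=
  let c := cellAt space j i k
  let n := counts.getD (j, i, k) 0
  if c == "#" then (if n == 2 || n == 3 then "#" else ".")
  else if c == "." then (if n == 3 then "#" else ".")
  else c

def round1_alt (space : List (List (List String))) (h_ : Int) (w : Int) (d : Int) : List (List (List String)) :=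
  let counts := scatter space h_ w d
  (PySem.List.pyRange 0 h_ 1).map (fun j =>
    (PySem.List.pyRange 0 w 1).map (fun i =>
      (PySem.List.pyRange 0 d 1).map (fun k => applyCell space counts j i k)))

-- ===== PRECONDITION & SPEC =====
-- Pre_: exactly where the Python returns — if all three dims are positive the first h_ rows must
-- have width ≥ w and their first w columns depth ≥ d (otherwise an IndexError); if any dim ≤ 0
-- nothing is ever indexed.
def Pre_round1 (space : List (List (List String))) (h_ : Int) (w : Int) (d : Int) : Prop :=
  h_ ≤ 0 ∨ w ≤ 0 ∨ d ≤ 0 ∨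
    (h_ ≤ (space.length : Int) ∧ ∀ row ∈ space.take h_.toNat,
      w ≤ (row.length : Int) ∧ ∀ col ∈ row.take w.toNat, d ≤ (col.length : Int))
instance (space : List (List (List String))) (h_ : Int) (w : Int) (d : Int) : Decidable (Pre_round1 space h_ w d) := by unfold Pre_round1; infer_instance

def pvWitness_round1 : List (List (List String)) × Int × Int × Int :=
  ([[["#", "."], [".", "."]], [[".", "#"], [".", "."]]], 2, 2, 2)

def Spec_round1 (space : List (List (List String))) (h_ : Int) (w : Int) (d : Int) (out : List (List (List String))) : Prop := out = round1_alt space h_ w d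
instance (space : List (List (List String))) (h_ : Int) (w : Int) (d : Int) (out : List (List (List String))) : Decidable (Spec_round1 space h_ w d out) := by unfold Spec_round1; infer_instance

-- ===== CLAIM (what is proved, stated in full; the proofs are below) =====
def Claim_equal_round1 : Prop := ∀ (space : List (List (List String))) (h_ : Int) (w : Int) (d : Int), Dom_round1 space h_ w d → Pre_round1 space h_ w d → Spec_round1 space h_ w d (round1 space h_ w d)

-- ===== LEMMAS AND PROOFS =====

-- ---- generic fold / count toolbox ----
lemma foldl_flatMap' {α β σ : Type} (l : List α) (f : α → List β) (g : σ → β → σ) (init : σ) :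
    (l.flatMap f).foldl g init = l.foldl (fun acc x => (f x).foldl g acc) init := by
  induction l generalizing init with
  | nil => rfl
  | cons a l ih => simp [List.flatMap_cons, List.foldl_append, ih]

lemma foldl_if_nil {β σ : Type} (P : Prop) [Decidable P] (L : List β) (g : σ → β → σ) (acc : σ) :
    (if P then L else []).foldl g acc = if P then L.foldl g acc else acc := by
  split <;> rfl

lemma foldl_filterMap_if {α β σ : Type} (l : List α) (p : α → Prop) [DecidablePred p]
    (m : α → β) (g : σ → β → σ) (init : σ) :
    (l.filterMap (fun x => if p x then some (m x) else none)).foldl g init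
      = l.foldl (fun s x => if p x then g s (m x) else s) init := by
  induction l generalizing init with
  | nil => rfl
  | cons a l ih => by_cases h : p a <;> simp [List.filterMap_cons, h, ih]

lemma count_flatMap' {α β : Type} [BEq β] (l : List α) (f : α → List β) (q : β) :
    ((l.flatMap f).count q) = (l.map (fun x => (f x).count q)).sum := by
  induction l with
  | nil => rfl
  | cons a l ih => simp [List.flatMap_cons, List.count_append, ih]

lemma count_filterMap_if {α β : Type} [BEq β] [LawfulBEq β] [DecidableEq β] (l : List α) (p : α → Prop)
    [DecidablePred p] (m : α → β) (q : β) :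
    ((l.filterMap (fun x => if p x then some (m x) else none)).count q)
      = (l.map (fun x => if p x ∧ m x = q then 1 else 0)).sum := by
  induction l with
  | nil => rfl
  | cons a l ih =>
    by_cases hp : p a
    · by_cases hq : m a = q <;>
        simp [List.filterMap_cons, hp, hq, List.count_cons, ih] <;> omega
    · simp [List.filterMap_cons, hp, ih]

lemma sum_map_zero' {α : Type} (l : List α) : (l.map (fun _ => (0 : ℕ))).sum = 0 := by
  induction l <;> simp [*]

lemma sum_map_add' {α : Type} (l : List α) (f g : α → ℕ) :
    (l.map (fun x => f x + g x)).sum = (l.map f).sum + (l.map g).sum := by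
  induction l with
  | nil => rfl
  | cons a l ih => simp [ih]; omega

lemma sum_swap' {α β : Type} (l : List α) (m : List β) (g : α → β → ℕ) :
    (l.map (fun x => (m.map (g x)).sum)).sum = (m.map (fun y => (l.map (fun x => g x y)).sum)).sum := by
  induction l with
  | nil => simp [sum_map_zero']
  | cons a l ih => simp [sum_map_add', ih]

lemma count_ite {β : Type} [BEq β] [LawfulBEq β] [DecidableEq β] (l : List β) (p : β) (P : β → Prop)
    [DecidablePred P] :
    (l.map (fun s => if s = p ∧ P s then (1 : ℕ) else 0)).sum
      = if P p then l.count p else 0 := by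
  induction l with
  | nil => simp
  | cons a l ih =>
    by_cases ha : a = p
    · subst ha
      by_cases hP : P a <;> simp [List.count_cons, hP, ih] <;> omega
    · simp [List.count_cons, ha, ih]

-- ---- the scatter dict characterised as a count over a flat key list ----
def nbrs (h_ w d j i k : Int) : List (Int × Int × Int) :=
  offsets26.filterMap (fun o =>
    if 0 ≤ j + o.1 ∧ j + o.1 < h_ ∧ 0 ≤ i + o.2.1 ∧ i + o.2.1 < w ∧
       0 ≤ k + o.2.2 ∧ k + o.2.2 < d then
      some (j + o.1, i + o.2.1, k + o.2.2)
    else none)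

def cells (h_ w d : Int) : List (Int × Int × Int) :=
  (PySem.List.pyRange 0 h_ 1).flatMap (fun j =>
    (PySem.List.pyRange 0 w 1).flatMap (fun i =>
      (PySem.List.pyRange 0 d 1).map (fun k => (j, i, k))))

def keyList (space : List (List (List String))) (h_ w d : Int) : List (Int × Int × Int) :=
  (cells h_ w d).flatMap (fun s =>
    if cellAt space s.1 s.2.1 s.2.2 == "#" then nbrs h_ w d s.1 s.2.1 s.2.2 else [])

lemma scatter_eq (space : List (List (List String))) (h_ w d : Int) :
    scatter space h_ w d
      = (keyList space h_ w d).foldl (fun cnts p => cnts.insert p (cnts.getD p 0 + 1))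
          PySem.Dict.empty := by
  unfold scatter keyList cells nbrs
  simp only [foldl_flatMap', List.foldl_map, foldl_if_nil, foldl_filterMap_if]

lemma mem_cells {h_ w d : Int} {s : Int × Int × Int} :
    s ∈ cells h_ w d ↔ 0 ≤ s.1 ∧ s.1 < h_ ∧ 0 ≤ s.2.1 ∧ s.2.1 < w ∧ 0 ≤ s.2.2 ∧ s.2.2 < d := by
  obtain ⟨a, b, c⟩ := s
  simp only [cells, List.mem_flatMap, List.mem_map, PySem.List.mem_pyRange_one]
  constructor
  · rintro ⟨j, hj, i, hi, k, hk, heq⟩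
    simp only [Prod.mk.injEq] at heq
    obtain ⟨rfl, rfl, rfl⟩ := heq
    exact ⟨hj.1, hj.2, hi.1, hi.2, hk.1, hk.2⟩
  · rintro ⟨h1, h2, h3, h4, h5, h6⟩
    exact ⟨a, ⟨h1, h2⟩, b, ⟨h3, h4⟩, c, ⟨h5, h6⟩, rfl⟩

lemma nodup_cells (h_ w d : Int) : (cells h_ w d).Nodup := by
  unfold cells
  refine List.nodup_flatMap.2 ⟨fun j _ => ?_, ?_⟩
  · refine List.nodup_flatMap.2 ⟨fun i _ => ?_, ?_⟩
    · exact (PySem.List.nodup_pyRange_one 0 d).map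
        (fun k k' h => by simpa using congrArg (fun t => t.2.2) h)
    · refine ((PySem.List.nodup_pyRange_one 0 w).imp ?_)
      intro i i' hne
      intro t ht ht'
      simp only [List.mem_map] at ht ht'
      obtain ⟨k, _, rfl⟩ := ht
      obtain ⟨k', _, hk'⟩ := ht'
      exact hne (by simpa using congrArg (fun t => t.2.1) hk'.symm)
  · refine ((PySem.List.nodup_pyRange_one 0 h_).imp ?_)
    intro j j' hne
    intro t ht ht'
    simp only [List.mem_flatMap, List.mem_map] at ht ht'
    obtain ⟨i, _, k, _, rfl⟩ := ht
    obtain ⟨i', _, k', _, hk'⟩ := ht'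
    exact hne (by simpa using congrArg (fun t => t.1) hk'.symm)

lemma count_cells (h_ w d : Int) (p : Int × Int × Int) :
    (cells h_ w d).count p
      = if 0 ≤ p.1 ∧ p.1 < h_ ∧ 0 ≤ p.2.1 ∧ p.2.1 < w ∧ 0 ≤ p.2.2 ∧ p.2.2 < d then 1 else 0 := by
  by_cases hp : 0 ≤ p.1 ∧ p.1 < h_ ∧ 0 ≤ p.2.1 ∧ p.2.1 < w ∧ 0 ≤ p.2.2 ∧ p.2.2 < d
  · rw [if_pos hp]
    exact List.count_eq_one_of_mem (nodup_cells h_ w d) (mem_cells.2 hp)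
  · rw [if_neg hp]
    exact List.count_eq_zero_of_not_mem (fun hm => hp (mem_cells.1 hm))

-- in-bounds-and-active test used by the gather characterisation of countNeighbors
def isActive (space : List (List (List String))) (h_ w d j i k : Int) : Bool :=
  decide (0 ≤ j ∧ j < h_ ∧ 0 ≤ i ∧ i < w ∧ 0 ≤ k ∧ k < d) && (cellAt space j i k == "#")

-- the contribution of one offset to A's neighbour count
def deltaA (space : List (List (List String))) (h_ w d j i k ja ia da : Int) : Int :=
  if 0 ≤ j + ja ∧ j + ja < h_ ∧ 0 ≤ i + ia ∧ i + ia < w ∧ 0 ≤ k + da ∧ k + da < d then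
    if ia = 0 ∧ ja = 0 ∧ da = 0 then 0
    else if cellAt space (j + ja) (i + ia) (k + da) == "#" then 1 else 0
  else 0

lemma foldl_shift {β : Type} (f : Int → β → Int) (g : β → Int) (h : ∀ c x, f c x = c + g x)
    (l : List β) (c : Int) : l.foldl f c = c + (l.map g).sum := by
  rw [show f = fun c x => c + g x from funext fun c => funext fun x => h c x]
  exact PySem.List.foldl_add l g c

lemma countA_eq_sum (space : List (List (List String))) (j i k h_ w d : Int) :
    countNeighbors space j i k h_ w d =
      (([-1, 0, 1] : List Int).map (fun ja =>
        (([-1, 0, 1] : List Int).map (fun ia =>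
          (([-1, 0, 1] : List Int).map (fun da => deltaA space h_ w d j i k ja ia da)).sum)).sum)).sum := by
  unfold countNeighbors
  rw [foldl_shift _ (fun ja =>
        (([-1, 0, 1] : List Int).map (fun ia =>
          (([-1, 0, 1] : List Int).map (fun da => deltaA space h_ w d j i k ja ia da)).sum)).sum)
      (fun c ja => foldl_shift _ (fun ia =>
          (([-1, 0, 1] : List Int).map (fun da => deltaA space h_ w d j i k ja ia da)).sum)
        (fun c ia => foldl_shift _ (fun da => deltaA space h_ w d j i k ja ia da)
          (fun c da => by simp only [deltaA]; split_ifs <;> omega) _ c) _ c) _ 0]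
  simp

lemma deltaA_self (space : List (List (List String))) (h_ w d j i k : Int) :
    deltaA space h_ w d j i k 0 0 0 = 0 := by
  simp [deltaA]

lemma deltaA_ne (space : List (List (List String))) (h_ w d j i k ja ia da : Int)
    (hne : ¬(ia = 0 ∧ ja = 0 ∧ da = 0)) :
    deltaA space h_ w d j i k ja ia da =
      if isActive space h_ w d (j + ja) (i + ia) (k + da) then 1 else 0 := by
  simp only [deltaA, isActive]
  by_cases hb : 0 ≤ j + ja ∧ j + ja < h_ ∧ 0 ≤ i + ia ∧ i + ia < w ∧ 0 ≤ k + da ∧ k + da < d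
  · by_cases hh : cellAt space (j + ja) (i + ia) (k + da) == "#" <;> simp [hb, hh, hne]
  · simp [hb]

lemma count_eq (space : List (List (List String))) (h_ w d j i k : Int) :
    countNeighbors space j i k h_ w d =
      (offsets26.map (fun o =>
        if isActive space h_ w d (j + o.1) (i + o.2.1) (k + o.2.2) then (1 : Int) else 0)).sum := by
  rw [countA_eq_sum]
  show _ = (List.map _ offsets26).sum
  rw [show offsets26 = [(-1,-1,-1),(-1,-1,0),(-1,-1,1),(-1,0,-1),(-1,0,0),(-1,0,1),(-1,1,-1),(-1,1,0),(-1,1,1),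
       (0,-1,-1),(0,-1,0),(0,-1,1),(0,0,-1),(0,0,1),(0,1,-1),(0,1,0),(0,1,1),
       (1,-1,-1),(1,-1,0),(1,-1,1),(1,0,-1),(1,0,0),(1,0,1),(1,1,-1),(1,1,0),(1,1,1)] from by decide]
  simp only [List.map_cons, List.map_nil, List.sum_cons, List.sum_nil]
  rw [deltaA_self,
      deltaA_ne space h_ w d j i k (-1) (-1) (-1) (by decide),
      deltaA_ne space h_ w d j i k (-1) (-1) (0) (by decide),
      deltaA_ne space h_ w d j i k (-1) (-1) (1) (by decide),
      deltaA_ne space h_ w d j i k (-1) (0) (-1) (by decide),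
      deltaA_ne space h_ w d j i k (-1) (0) (0) (by decide),
      deltaA_ne space h_ w d j i k (-1) (0) (1) (by decide),
      deltaA_ne space h_ w d j i k (-1) (1) (-1) (by decide),
      deltaA_ne space h_ w d j i k (-1) (1) (0) (by decide),
      deltaA_ne space h_ w d j i k (-1) (1) (1) (by decide),
      deltaA_ne space h_ w d j i k (0) (-1) (-1) (by decide),
      deltaA_ne space h_ w d j i k (0) (-1) (0) (by decide),
      deltaA_ne space h_ w d j i k (0) (-1) (1) (by decide),
      deltaA_ne space h_ w d j i k (0) (0) (-1) (by decide),
      deltaA_ne space h_ w d j i k (0) (0) (1) (by decide),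
      deltaA_ne space h_ w d j i k (0) (1) (-1) (by decide),
      deltaA_ne space h_ w d j i k (0) (1) (0) (by decide),
      deltaA_ne space h_ w d j i k (0) (1) (1) (by decide),
      deltaA_ne space h_ w d j i k (1) (-1) (-1) (by decide),
      deltaA_ne space h_ w d j i k (1) (-1) (0) (by decide),
      deltaA_ne space h_ w d j i k (1) (-1) (1) (by decide),
      deltaA_ne space h_ w d j i k (1) (0) (-1) (by decide),
      deltaA_ne space h_ w d j i k (1) (0) (0) (by decide),
      deltaA_ne space h_ w d j i k (1) (0) (1) (by decide),
      deltaA_ne space h_ w d j i k (1) (1) (-1) (by decide),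
      deltaA_ne space h_ w d j i k (1) (1) (0) (by decide),
      deltaA_ne space h_ w d j i k (1) (1) (1) (by decide)]
  set_option maxHeartbeats 1000000 in
  simp only [add_assoc, add_zero, zero_add]

-- ---- the dict lookup equals A's neighbour count (the heart of the equivalence) ----
set_option maxHeartbeats 1200000 in
lemma keyList_count (space : List (List (List String))) (h_ w d qj qi qk : Int)
    (hq : 0 ≤ qj ∧ qj < h_ ∧ 0 ≤ qi ∧ qi < w ∧ 0 ≤ qk ∧ qk < d) :
    ((keyList space h_ w d).count (qj, qi, qk))
      = (offsets26.map (fun o =>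
          if isActive space h_ w d (qj - o.1) (qi - o.2.1) (qk - o.2.2) then (1 : ℕ) else 0)).sum := by
  unfold keyList
  rw [count_flatMap']
  -- per-cell: the count inside one cell's contribution, as a sum of merged indicators over offsets
  have hs : ∀ s ∈ cells h_ w d,
      ((if cellAt space s.1 s.2.1 s.2.2 == "#" then nbrs h_ w d s.1 s.2.1 s.2.2 else []).count
          (qj, qi, qk))
        = (offsets26.map (fun o =>
            if s = (qj - o.1, qi - o.2.1, qk - o.2.2) ∧
                ((cellAt space s.1 s.2.1 s.2.2 == "#") ∧
                 (0 ≤ s.1 + o.1 ∧ s.1 + o.1 < h_ ∧ 0 ≤ s.2.1 + o.2.1 ∧ s.2.1 + o.2.1 < w ∧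
                  0 ≤ s.2.2 + o.2.2 ∧ s.2.2 + o.2.2 < d)) then (1 : ℕ) else 0)).sum := by
    intro s _
    by_cases hC : cellAt space s.1 s.2.1 s.2.2 == "#"
    · rw [if_pos hC]
      unfold nbrs
      rw [count_filterMap_if]
      refine congrArg List.sum (List.map_congr_left fun o _ => ?_)
      refine if_congr ?_ rfl rfl
      obtain ⟨s1, s2, s3⟩ := s
      obtain ⟨o1, o2, o3⟩ := o
      simp only [Prod.mk.injEq]
      constructor
      · rintro ⟨hb, he1, he2, he3⟩
        exact ⟨⟨by omega, by omega, by omega⟩, hC, hb⟩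
      · rintro ⟨⟨he1, he2, he3⟩, -, hb⟩
        exact ⟨hb, by omega, by omega, by omega⟩
    · rw [if_neg hC]
      rw [show (offsets26.map (fun o =>
            if s = (qj - o.1, qi - o.2.1, qk - o.2.2) ∧
                ((cellAt space s.1 s.2.1 s.2.2 == "#") ∧
                 (0 ≤ s.1 + o.1 ∧ s.1 + o.1 < h_ ∧ 0 ≤ s.2.1 + o.2.1 ∧ s.2.1 + o.2.1 < w ∧
                  0 ≤ s.2.2 + o.2.2 ∧ s.2.2 + o.2.2 < d)) then (1 : ℕ) else 0))
          = offsets26.map (fun _ => 0) from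
        List.map_congr_left fun o _ => if_neg (fun h => hC h.2.1), sum_map_zero']
      rfl
  rw [List.map_congr_left hs, sum_swap' (cells h_ w d) offsets26]
  refine congrArg List.sum (List.map_congr_left fun o _ => ?_)
  rw [count_ite (cells h_ w d) ((qj - o.1, qi - o.2.1, qk - o.2.2)) (fun s =>
        (cellAt space s.1 s.2.1 s.2.2 == "#") ∧
        (0 ≤ s.1 + o.1 ∧ s.1 + o.1 < h_ ∧ 0 ≤ s.2.1 + o.2.1 ∧ s.2.1 + o.2.1 < w ∧
         0 ≤ s.2.2 + o.2.2 ∧ s.2.2 + o.2.2 < d)),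
      count_cells]
  simp [isActive]
  obtain ⟨hq1, hq2, hq3, hq4, hq5, hq6⟩ := hq
  split_ifs <;> tauto

-- negation of an offset; reversing the lexicographic offset list negates every entry
lemma offsets26_neg :
    offsets26.map (fun o : Int × Int × Int => (-o.1, -o.2.1, -o.2.2)) = offsets26.reverse := by
  decide

lemma getD_scatter (space : List (List (List String))) (h_ w d qj qi qk : Int)
    (hq : 0 ≤ qj ∧ qj < h_ ∧ 0 ≤ qi ∧ qi < w ∧ 0 ≤ qk ∧ qk < d) :
    (scatter space h_ w d).getD (qj, qi, qk) 0 = countNeighbors space qj qi qk h_ w d := by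
  rw [scatter_eq, PySem.Dict.getD_foldl_insert_add_one, PySem.Dict.getD_empty, zero_add,
      keyList_count space h_ w d qj qi qk hq, count_eq]
  rw [Nat.cast_list_sum, List.map_map]
  have hcast : List.map (Nat.cast ∘ fun o : Int × Int × Int =>
        if isActive space h_ w d (qj - o.1) (qi - o.2.1) (qk - o.2.2) then (1 : ℕ) else 0) offsets26
      = offsets26.map (fun o : Int × Int × Int =>
        if isActive space h_ w d (qj - o.1) (qi - o.2.1) (qk - o.2.2) then (1 : ℤ) else 0) := by
    apply List.map_congr_left
    intro o _
    simp [Function.comp, apply_ite (fun n : ℕ => (n : ℤ))]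
  rw [hcast]
  have hneg : (offsets26.map (fun o : Int × Int × Int =>
        if isActive space h_ w d (qj - o.1) (qi - o.2.1) (qk - o.2.2) then (1 : ℤ) else 0))
      = (offsets26.map (fun o : Int × Int × Int => (-o.1, -o.2.1, -o.2.2))).map
          (fun o : Int × Int × Int =>
            if isActive space h_ w d (qj + o.1) (qi + o.2.1) (qk + o.2.2) then (1 : ℤ) else 0) := by
    rw [List.map_map]
    apply List.map_congr_left
    intro o _
    simp [Function.comp, sub_eq_add_neg]
  rw [hneg, offsets26_neg]
  rw [List.map_reverse, List.sum_reverse]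

-- ---- B's rule chain agrees with A's (same cell, same count) ----
lemma rule_eq (c : String) (n : Int) :
    (if (c == "#") && !(n == 2 || n == 3) then "."
     else if (c == ".") && (n == 3) then "#" else c)
      = (if c == "#" then (if n == 2 || n == 3 then "#" else ".")
         else if c == "." then (if n == 3 then "#" else ".") else c) := by
  by_cases h1 : c = "#"
  · subst h1; by_cases h2 : n == 2 || n == 3 <;> simp_all <;> omega
  · by_cases h2 : c = "." <;> by_cases h3 : n = 3 <;> simp_all

-- ---- A's in-place fills reorganised into the comprehension grid (unchanged machinery) ----
lemma foldl_set_const_idx {α β : Type} (dflt : α) (j : Nat) (G : α → β → α) :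
    ∀ (ks : List β) (l : List α),
      ks.foldl (fun g k => g.set j (G (g.getD j dflt) k)) l = l.set j (ks.foldl G (l.getD j dflt)) := by
  intro ks
  induction ks with
  | nil =>
    intro l
    by_cases hj : j < l.length
    · simp [List.getD, List.getElem?_eq_getElem hj, List.set_getElem_self]
    · simp [List.set_eq_of_length_le (Nat.le_of_not_lt hj)]
  | cons k ks ih =>
    intro l
    simp only [List.foldl_cons]
    rw [ih]
    by_cases hj : j < l.length
    · rw [List.set_set]
      congr 2
      simp [List.getD, hj]
    · simp [List.set_eq_of_length_le (Nat.le_of_not_lt hj)]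

lemma foldl_set_append_last {α : Type} (dflt : α) (F : Nat → α → α) :
    ∀ (js : List Nat) (ys : List α) (x : α), (∀ j ∈ js, j < ys.length) →
      js.foldl (fun g k => g.set k (F k (g.getD k dflt))) (ys ++ [x]) =
        js.foldl (fun g k => g.set k (F k (g.getD k dflt))) ys ++ [x] := by
  intro js
  induction js with
  | nil => intro ys x _; rfl
  | cons j js ih =>
    intro ys x hb
    have hj : j < ys.length := hb j (by simp)
    simp only [List.foldl_cons]
    rw [show (ys ++ [x]).getD j dflt = ys.getD j dflt by
          simp [List.getD, List.getElem?_append_left hj],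
        List.set_append_left _ _ hj, ih]
    intro j' hj'
    have := hb j' (by simp [hj'])
    simpa using this

lemma foldl_set_range {α : Type} (dflt : α) (F : Nat → α → α) :
    ∀ (l : List α), (List.range l.length).foldl (fun g k => g.set k (F k (g.getD k dflt))) l = l.mapIdx F := by
  intro l
  induction l using List.reverseRecOn with
  | nil => rfl
  | append_singleton ys x ih =>
    rw [List.length_append, List.length_singleton, List.range_succ, List.foldl_append,
        foldl_set_append_last dflt F _ _ _ (by intro j hj; simpa using List.mem_range.mp hj), ih]
    simp only [List.foldl_cons, List.foldl_nil]
    have hlen : (ys.mapIdx F).length = ys.length := by simp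
    rw [show (ys.mapIdx F ++ [x]).getD ys.length dflt = x by
          rw [← hlen]; simp [List.getD],
        List.mapIdx_concat]
    rw [← hlen, List.set_append_right _ _ (le_refl _)]
    simp [hlen]

lemma foldl_set_range' {α : Type} (dflt : α) (F : Nat → α → α) (l : List α) (n : Nat) (h : n = l.length) :
    (List.range n).foldl (fun g k => g.set k (F k (g.getD k dflt))) l = l.mapIdx F := by
  subst h; exact foldl_set_range dflt F l

lemma fill3 (space : List (List (List String))) (h_ w d : Int) :
    List.foldl (fun rs jn => rs.set jn (List.foldl (fun row inn => row.set inn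
        (List.foldl (fun col kn => col.set kn (newCellA space h_ w d ↑jn ↑inn ↑kn)) (row.getD inn []) (List.range d.toNat)))
      (rs.getD jn []) (List.range w.toNat)))
      (List.map (fun _ => List.map (fun _ => List.map (fun _ => ".") (List.range d.toNat)) (List.range w.toNat)) (List.range h_.toNat))
      (List.range h_.toNat)
    = List.map (fun jn : Nat => List.map (fun inn : Nat => List.map (fun kn : Nat => newCellA space h_ w d ↑jn ↑inn ↑kn) (List.range d.toNat)) (List.range w.toNat)) (List.range h_.toNat) := by
  rw [foldl_set_range' []
    (fun jn row => List.foldl (fun row inn => row.set inn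
      (List.foldl (fun col kn => col.set kn (newCellA space h_ w d ↑jn ↑inn ↑kn)) (row.getD inn []) (List.range d.toNat)))
      row (List.range w.toNat))
    (List.map (fun _ => List.map (fun _ => List.map (fun _ => ".") (List.range d.toNat)) (List.range w.toNat)) (List.range h_.toNat))
    h_.toNat (by simp)]
  apply List.ext_getElem (by simp)
  intro jn hj1 hj2
  simp only [List.getElem_mapIdx, List.getElem_map, List.getElem_range]
  rw [foldl_set_range' []
    (fun inn c => List.foldl (fun col kn => col.set kn (newCellA space h_ w d ↑jn ↑inn ↑kn)) c (List.range d.toNat))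
    (List.map (fun _ => List.map (fun _ => ".") (List.range d.toNat)) (List.range w.toNat))
    w.toNat (by simp)]
  apply List.ext_getElem (by simp)
  intro inn hi1 hi2
  simp only [List.getElem_mapIdx, List.getElem_map, List.getElem_range]
  have h3 := foldl_set_range' "" (fun kn (_ : String) => newCellA space h_ w d ↑jn ↑inn ↑kn)
    (List.map (fun _ => ".") (List.range d.toNat)) d.toNat (by simp)
  simp only at h3
  rw [h3]
  apply List.ext_getElem (by simp)
  intro kn hk1 hk2
  simp only [List.getElem_mapIdx, List.getElem_map, List.getElem_range]

-- per-cell agreement on in-range coordinates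
lemma cell_eq (space : List (List (List String))) (h_ w d j i k : Int)
    (hq : 0 ≤ j ∧ j < h_ ∧ 0 ≤ i ∧ i < w ∧ 0 ≤ k ∧ k < d) :
    newCellA space h_ w d j i k = applyCell space (scatter space h_ w d) j i k := by
  unfold newCellA applyCell
  rw [getD_scatter space h_ w d j i k hq]
  exact rule_eq (cellAt space j i k) (countNeighbors space j i k h_ w d)

theorem main_eq (space : List (List (List String))) (h_ w d : Int) :
    round1 space h_ w d = round1_alt space h_ w d := by
  unfold round1 round1_alt set3
  simp only [PySem.List.pyRange_one, Int.sub_zero, zero_add, List.foldl_map, List.map_map,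
    Function.comp_def, PySem.List.pySetD_natCast, PySem.List.pyGetD_natCast]
  have e1 : ∀ (rs : List (List (List String))) (jn inn : Nat),
      List.foldl (fun x y_2 => x.set jn ((x.getD jn []).set inn
        (((x.getD jn []).getD inn []).set y_2 (newCellA space h_ w d ↑jn ↑inn ↑y_2)))) rs (List.range d.toNat)
      = rs.set jn ((rs.getD jn []).set inn
          (List.foldl (fun col kn => col.set kn (newCellA space h_ w d ↑jn ↑inn ↑kn))
            ((rs.getD jn []).getD inn []) (List.range d.toNat))) := by
    intro rs jn inn
    rw [foldl_set_const_idx [] jn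
      (fun row kn => row.set inn ((row.getD inn []).set kn (newCellA space h_ w d ↑jn ↑inn ↑kn)))
      (List.range d.toNat) rs,
      foldl_set_const_idx [] inn
      (fun col kn => col.set kn (newCellA space h_ w d ↑jn ↑inn ↑kn))
      (List.range d.toNat) (rs.getD jn [])]
  simp only [e1]
  have e2 : ∀ (rs : List (List (List String))) (jn : Nat),
      List.foldl (fun x y_1 => x.set jn ((x.getD jn []).set y_1
        (List.foldl (fun col kn => col.set kn (newCellA space h_ w d ↑jn ↑y_1 ↑kn))
          ((x.getD jn []).getD y_1 []) (List.range d.toNat)))) rs (List.range w.toNat)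
      = rs.set jn (List.foldl (fun row inn => row.set inn
          (List.foldl (fun col kn => col.set kn (newCellA space h_ w d ↑jn ↑inn ↑kn))
            (row.getD inn []) (List.range d.toNat))) (rs.getD jn []) (List.range w.toNat)) := by
    intro rs jn
    rw [foldl_set_const_idx [] jn
      (fun row inn => row.set inn (List.foldl (fun col kn => col.set kn (newCellA space h_ w d ↑jn ↑inn ↑kn))
        (row.getD inn []) (List.range d.toNat))) (List.range w.toNat) rs]
  simp only [e2]
  rw [fill3 space h_ w d]
  apply List.map_congr_left
  intro jn hj
  apply List.map_congr_left
  intro inn hi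
  apply List.map_congr_left
  intro kn hk
  rw [List.mem_range] at hj hi hk
  exact cell_eq space h_ w d ↑jn ↑inn ↑kn (by omega)

-- ===== VERDICT (by name: the statement is the Claim_ definition above) =====
theorem round1_spec : Claim_equal_round1 := by
  intro space h_ w d _ _
  unfold Spec_round1
  exact main_eq space h_ w d
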